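-- pv_equiv track=rewrite | github.com/TomNij/AdventofCode | Advent_Code_2015/Day11/Password_creator.py | update_left
-- ===== SOURCE A (Python) =====
-- def update_left(num_pass):
--     if num_pass[-1] == 25:
--         out = update_left(num_pass[0:-1])
--         out.append(0)
--         return out
--     else:
--         num_pass[-1] += 1
--         return num_pass
-- ===== SOURCE B (Python) =====
-- def update_left(num_pass):
--     rev = num_pass[::-1]
--     k = 0
--     while rev[k] == 25:
--         k += 1
--     return num_pass[:-k-1] + [rev[k] + 1] + [0] * k
-- ===== Notes on version B (the rewrite author's own statement) =====
-- stated objective: alternative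
-- what changed: Replaces A's recursion (strip last element, recurse, append 0) by a single non-recursive pass: count the trailing 25s on the reversed list, then build the result with one slice, one incremented digit and a block of zeros.
import Mathlib
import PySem

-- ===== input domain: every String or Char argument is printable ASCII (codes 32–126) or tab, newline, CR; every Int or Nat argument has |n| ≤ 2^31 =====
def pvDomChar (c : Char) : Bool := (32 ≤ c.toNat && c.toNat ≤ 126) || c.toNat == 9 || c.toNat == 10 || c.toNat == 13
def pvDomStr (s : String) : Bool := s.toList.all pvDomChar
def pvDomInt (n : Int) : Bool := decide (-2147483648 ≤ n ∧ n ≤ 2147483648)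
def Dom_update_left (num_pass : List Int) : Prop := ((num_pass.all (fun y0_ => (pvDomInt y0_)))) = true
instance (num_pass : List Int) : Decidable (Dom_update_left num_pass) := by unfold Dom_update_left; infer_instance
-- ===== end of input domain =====

-- B replaces A's recursion by one counting pass over the reversed list; A mutates its
-- argument in the no-carry case, B never mutates — the equivalence proved is about the
-- RETURN value only.

-- ===== PORT A =====
-- literal port of A; the `none` branch is where Python raises IndexError (excluded by Pre_)
def update_left (num_pass : List Int) : List Int :=
  match h : PySem.List.pyGet? num_pass (-1) with
  | none => []      -- IndexError in Python
  | some x =>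
    if x == 25 then
      update_left (PySem.List.slice num_pass (some 0) (some (-1))) ++ [0]
    else
      PySem.List.slice num_pass none (some (-1)) ++ [x + 1]   -- num_pass[-1] += 1; return num_pass
termination_by num_pass.length
decreasing_by
  simp [PySem.List.slice_zero_start, PySem.List.slice_to_neg_one]
  have : num_pass ≠ [] := by
    intro hnil; subst hnil; simp [PySem.List.pyGet?] at h
  cases num_pass with
  | nil => exact absurd rfl this
  | cons a t => simp

-- ===== PORT B =====
-- `while rev[k] == 25: k += 1` — structural recursion on the reversed list
def countLead25 : List Int → Nat
  | [] => 0            -- Python's while would raise IndexError here (excluded by Pre_)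
  | x :: t => if x == 25 then countLead25 t + 1 else 0

def update_left_alt (num_pass : List Int) : List Int :=
  let rev := num_pass.reverse          -- num_pass[::-1]  (PySem.List.slice?_none_none_neg_one)
  let k := countLead25 rev
  match PySem.List.pyGet? rev (k : Int) with   -- rev[k]
  | none => []       -- IndexError in Python (excluded by Pre_)
  | some v =>
    PySem.List.slice num_pass none (some (-((k : Int) + 1))) ++ [v + 1] ++ List.replicate k 0

-- ===== PRECONDITION & SPEC =====
-- A (and B) raise IndexError exactly when every element is 25 (including the empty list).
def Pre_update_left (num_pass : List Int) : Prop := ∃ x ∈ num_pass, x ≠ 25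
instance (num_pass : List Int) : Decidable (Pre_update_left num_pass) := by unfold Pre_update_left; infer_instance
def pvWitness_update_left : List Int := [3, 25]

def Spec_update_left (num_pass : List Int) (out : List Int) : Prop := out = update_left_alt num_pass
instance (num_pass : List Int) (out : List Int) : Decidable (Spec_update_left num_pass out) := by unfold Spec_update_left; infer_instance

-- ===== CLAIM (what is proved, stated in full; the proofs are below) =====
def Claim_equal_update_left : Prop := ∀ (num_pass : List Int), Dom_update_left num_pass → Pre_update_left num_pass → Spec_update_left num_pass (update_left num_pass)

-- ===== LEMMAS AND PROOFS =====

-- common reference value: increment the reversed digit string (carry from the front)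
def incRev : List Int → List Int
  | [] => []
  | x :: t => if x = 25 then 0 :: incRev t else (x + 1) :: t

theorem countLead25_lt {l : List Int} (h : ∃ x ∈ l, x ≠ 25) : countLead25 l < l.length := by
  induction l with
  | nil => simp at h
  | cons a t ih =>
    by_cases ha : a = 25
    · subst ha
      obtain ⟨x, hx, hne⟩ := h
      simp at hx
      rcases hx with hx | hx
      · exact absurd hx hne
      · have := ih ⟨x, hx, hne⟩
        simp [countLead25]; omega
    · simp [countLead25, ha]

theorem incRev_eq {l : List Int} (h : ∃ x ∈ l, x ≠ 25) :
    incRev l = List.replicate (countLead25 l) 0 ++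
      (l.getD (countLead25 l) 0 + 1) :: l.drop (countLead25 l + 1) := by
  induction l with
  | nil => simp at h
  | cons a t ih =>
    by_cases ha : a = 25
    · subst ha
      obtain ⟨x, hx, hne⟩ := h
      simp at hx
      rcases hx with hx | hx
      · exact absurd hx hne
      · simp [incRev, countLead25, ih ⟨x, hx, hne⟩, List.replicate_succ]
    · simp [incRev, countLead25, ha]

-- A equals the reference value
theorem updateLeft_eq_incRev : ∀ (l : List Int), (∃ x ∈ l, x ≠ 25) →
    update_left l = (incRev l.reverse).reverse := by
  intro l
  induction l using List.reverseRecOn with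
  | nil => intro h; simp at h
  | append_singleton t x ih =>
    intro h
    unfold update_left
    split
    · next heq => rw [PySem.List.pyGet?_neg_one_append_singleton] at heq; cases heq
    · next y heq =>
      rw [PySem.List.pyGet?_neg_one_append_singleton] at heq
      injection heq with heq; subst heq
      by_cases hx : x = 25
      · subst hx
        simp only [beq_self_eq_true, if_true]
        have hpre : ∃ y ∈ t, y ≠ 25 := by
          obtain ⟨y, hy, hne⟩ := h
          simp at hy
          rcases hy with hy | hy
          · exact ⟨y, hy, hne⟩
          · exact absurd hy hne
        rw [PySem.List.slice_zero_start, PySem.List.slice_to_neg_one]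
        have hd : (t ++ [(25:Int)]).dropLast = t := by simp
        rw [hd, ih hpre]
        simp [incRev]
      · rw [if_neg (by simp [hx])]
        rw [PySem.List.slice_to_neg_one]
        simp [incRev, hx]

-- B equals the reference value
theorem updateLeftAlt_eq_incRev (l : List Int) (h : ∃ x ∈ l, x ≠ 25) :
    update_left_alt l = (incRev l.reverse).reverse := by
  have hrev : ∃ x ∈ l.reverse, x ≠ 25 := by
    obtain ⟨x, hx, hne⟩ := h; exact ⟨x, by simpa using hx, hne⟩
  have hklt : countLead25 l.reverse < l.reverse.length := countLead25_lt hrev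
  have hget : PySem.List.pyGet? l.reverse ((countLead25 l.reverse : Nat) : Int)
      = some (l.reverse.getD (countLead25 l.reverse) 0) := by
    rw [PySem.List.pyGet?_natCast]
    simp [List.getElem?_eq_getElem hklt, List.getD]
  simp only [update_left_alt]
  rw [hget]
  have hcast : (-((countLead25 l.reverse : Int) + 1))
      = -(((countLead25 l.reverse + 1 : Nat) : Int)) := by push_cast; ring
  rw [hcast, PySem.List.slice_to_neg_natCast _ _ (Nat.succ_pos _)]
  rw [incRev_eq hrev]
  rw [List.reverse_append, List.reverse_cons, List.reverse_replicate,
    List.reverse_drop]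
  simp

-- ===== VERDICT (by name: the statement is the Claim_ definition above) =====
theorem update_left_spec : Claim_equal_update_left := by
  intro l _ hpre
  unfold Spec_update_left
  rw [updateLeft_eq_incRev l hpre, updateLeftAlt_eq_incRev l hpre]
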